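-- pv_equiv track=rewrite | github.com/Mik-user/module2hard | Module2Hard.py | make_parole
-- ===== SOURCE A (Python) =====
-- def make_parole (n): # n - значение 1-ого камня
--     list_ = list() # список кратных делителей n
--     list_.append(n)
--     for i in range(n): # составление списка кратных делителей n
--         if n % (i + 1) == 0 and (i + 1) > 2 and (i + 1) != n:
--             list_.append(i + 1)
--     pary = list()# список слагаемых для списка list_
--     for index in list_:
--         for i in range(index):
--             j = index - i - 1
--             if i + 1 < j:
--                 summ = str(i + 1) + str(j)
--                 pary.append(summ)
--     pary.sort()
--     parole = str()
--     for i in pary: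
--         parole = parole + i
--     return parole
-- ===== SOURCE B (Python) =====
-- def make_parole(n):
--     if n <= 2:
--         return ""
--     # n plus its divisors in (2, n), found by trial division up to sqrt(n)
--     divisors = {n}
--     i = 2
--     while i * i <= n:
--         if n % i == 0:
--             for d in (i, n // i):
--                 if d > 2 and d != n:
--                     divisors.add(d)
--         i += 1
--     # for each divisor d the summand pairs are exactly a = 1 .. (d+1)//2 - 1
--     return "".join(sorted(str(a) + str(d - a)
--                           for d in divisors
--                           for a in range(1, (d + 1) // 2)))
-- ===== Notes on version B (the rewrite author's own statement) =====
-- stated objective: faster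
-- what changed: B finds the divisors by trial division up to sqrt(n) into a set (instead of scanning all n residues), generates each divisor's summand pairs over the exact half-range range(1,(d+1)//2) instead of filtering the full range(d), and joins with ''.join(sorted(pairs)).
import Mathlib
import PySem

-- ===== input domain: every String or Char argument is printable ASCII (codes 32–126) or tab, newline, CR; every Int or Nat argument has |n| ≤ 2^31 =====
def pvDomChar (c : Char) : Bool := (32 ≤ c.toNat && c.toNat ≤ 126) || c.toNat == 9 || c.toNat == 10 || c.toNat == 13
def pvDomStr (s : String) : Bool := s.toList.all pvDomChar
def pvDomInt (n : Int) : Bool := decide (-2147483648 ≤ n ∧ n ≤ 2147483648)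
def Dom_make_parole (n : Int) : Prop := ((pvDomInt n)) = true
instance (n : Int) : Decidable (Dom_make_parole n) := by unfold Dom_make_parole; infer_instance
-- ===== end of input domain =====

-- B replaces A's O(n) divisor scan by trial division up to sqrt(n) into a set, emits each
-- divisor's summand pairs over the exact half-range, and joins the sorted pairs (objective: faster).


-- ===== PORT A =====
def make_parole (n : Int) : String :=
  let list_ : List Int :=
    (PySem.List.pyRange 0 n 1).foldl (fun acc i =>
      if PySem.Int.mod n (i + 1) = 0 ∧ i + 1 > 2 ∧ i + 1 ≠ n then acc ++ [i + 1] else acc)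
      ([] ++ [n])
  let pary : List String :=
    list_.foldl (fun acc idx =>
      (PySem.List.pyRange 0 idx 1).foldl (fun acc2 i =>
        if i + 1 < idx - i - 1 then
          acc2 ++ [PySem.Int.toStr (i + 1) ++ PySem.Int.toStr (idx - i - 1)]
        else acc2) acc) []
  let pary := PySem.List.sorted pary (fun x => x) false
  pary.foldl (fun parole i => parole ++ i) ""

-- ===== PORT B =====
-- 'for d in (i, n // i): if d > 2 and d != n: divisors.add(d)'
def pvAltStep (n : Int) (s : PySem.Set Int) (i : Int) : PySem.Set Int :=
  if PySem.Int.mod n i = 0 then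
    ([i, PySem.Int.floordiv n i]).foldl
      (fun s d => if d > 2 ∧ d ≠ n then PySem.Set.add s d else s) s
  else s

-- 'i = 2; while i * i <= n: …; i += 1'
def pvAltLoop (n : Int) (i : Int) (s : PySem.Set Int) : PySem.Set Int :=
  if _h : i * i ≤ n then pvAltLoop n (i + 1) (pvAltStep n s i) else s
termination_by (n + 1 - i).toNat
decreasing_by
  have hin : i ≤ n := by nlinarith [sq_nonneg (2 * i - 1)]
  omega

def make_parole_alt (n : Int) : String :=
  if n ≤ 2 then ""
  else
    let divisors := pvAltLoop n 2 (PySem.Set.add PySem.Set.empty n)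
    PySem.Str.join "" (PySem.List.sorted
      (divisors.foldl (fun acc d =>
        (PySem.List.pyRange 1 (PySem.Int.floordiv (d + 1) 2) 1).foldl
          (fun acc2 a => acc2 ++ [PySem.Int.toStr a ++ PySem.Int.toStr (d - a)]) acc) [])
      (fun x => x) false)

-- ===== PRECONDITION & SPEC =====
def Spec_make_parole (n : Int) (out : String) : Prop := out = make_parole_alt n
instance (n : Int) (out : String) : Decidable (Spec_make_parole n out) := by unfold Spec_make_parole; infer_instance

-- ===== CLAIM (what is proved, stated in full; the proofs are below) =====
def Claim_equal_make_parole : Prop := ∀ (n : Int), Dom_make_parole n → Spec_make_parole n (make_parole n)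

-- ===== LEMMAS AND PROOFS =====

-- the summand pairs of one divisor d, as B generates them
def pvPairs (d : Int) : List String :=
  (PySem.List.pyRange 1 (PySem.Int.floordiv (d + 1) 2) 1).map
    (fun a => PySem.Int.toStr a ++ PySem.Int.toStr (d - a))

-- A's divisor list
def pvListA (n : Int) : List Int :=
  n :: ((PySem.List.pyRange 0 n 1).filter
          (fun i => decide (PySem.Int.mod n (i + 1) = 0 ∧ i + 1 > 2 ∧ i + 1 ≠ n))).map
            (fun i => i + 1)

theorem pv_filter_pyRange_prefix (a b c : Int) (p : Int → Bool) (hcb : c ≤ b)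
    (hp : ∀ x, a ≤ x → x < b → (p x = true ↔ x < c)) :
    (PySem.List.pyRange a b 1).filter p = PySem.List.pyRange a c 1 := by
  by_cases hac : a ≤ c
  · rw [PySem.List.pyRange_one_append a c b hac hcb, List.filter_append]
    have h1 : (PySem.List.pyRange a c 1).filter p = PySem.List.pyRange a c 1 := by
      rw [List.filter_eq_self]
      intro x hx
      have := PySem.List.mem_pyRange_one.mp hx
      exact (hp x this.1 (lt_of_lt_of_le this.2 hcb)).mpr this.2
    have h2 : (PySem.List.pyRange c b 1).filter p = [] := by
      rw [List.filter_eq_nil_iff]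
      intro x hx
      have := PySem.List.mem_pyRange_one.mp hx
      intro hpx
      exact absurd ((hp x (le_trans hac this.1) this.2).mp hpx) (by omega)
    rw [h1, h2, List.append_nil]
  · rw [PySem.List.pyRange_one_eq_nil (a := a) (b := c) (by omega), List.filter_eq_nil_iff]
    intro x hx
    have := PySem.List.mem_pyRange_one.mp hx
    intro hpx
    exact absurd ((hp x this.1 this.2).mp hpx) (by omega)

-- A's inner pair generation for one divisor equals B's half-range form
theorem pv_pairsA_eq (d : Int) :
    ((PySem.List.pyRange 0 d 1).filter (fun i => decide (i + 1 < d - i - 1))).map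
      (fun i => PySem.Int.toStr (i + 1) ++ PySem.Int.toStr (d - i - 1)) = pvPairs d := by
  unfold pvPairs
  rw [PySem.Int.floordiv_eq_ediv_of_pos (by norm_num : (0:Int) < 2)]
  by_cases hd : d ≤ 0
  · rw [PySem.List.pyRange_one_eq_nil (a := 0) (b := d) (by omega),
        PySem.List.pyRange_one_eq_nil (a := 1) (b := (d + 1) / 2) (by omega)]
    simp
  · rw [pv_filter_pyRange_prefix 0 d ((d + 1) / 2 - 1) _ (by omega)
        (by intro x _ _; simp only [decide_eq_true_eq]; omega)]
    rw [PySem.List.pyRange_one, PySem.List.pyRange_one, List.map_map, List.map_map]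
    have ht : ((d + 1) / 2 - 1 - 0).toNat = ((d + 1) / 2 - 1).toNat := by omega
    rw [ht]
    apply List.map_congr_left
    intro k _
    simp only [Function.comp_apply]
    congr 1
    · congr 1; omega
    · congr 1; omega

-- A unfolds to fold-append of the sorted flatMap over pvListA
theorem pv_A_eq (n : Int) :
    make_parole n =
      (PySem.List.sorted ((pvListA n).flatMap pvPairs) (fun x => x) false).foldl
        (fun parole i => parole ++ i) "" := by
  simp only [make_parole, PySem.List.foldl_append_ite, PySem.List.foldl_append_eq_flatMap]
  have hfn : (fun idx => ((PySem.List.pyRange 0 idx 1).filter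
        (fun i => decide (i + 1 < idx - i - 1))).map
        (fun i => PySem.Int.toStr (i + 1) ++ PySem.Int.toStr (idx - i - 1))) = pvPairs :=
    funext pv_pairsA_eq
  rw [hfn]
  simp [pvListA]

theorem pv_mem_condAdd (n d x : Int) (s : PySem.Set Int) :
    (x ∈ (if d > 2 ∧ d ≠ n then PySem.Set.add s d else s)) ↔
      x ∈ s ∨ (x = d ∧ 2 < d ∧ d ≠ n) := by
  split_ifs with h <;> simp [PySem.Set.mem_add] <;> tauto

-- membership in one step of B's trial-division loop
theorem pv_mem_step (n : Int) (s : PySem.Set Int) (i x : Int) :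
    x ∈ pvAltStep n s i ↔
      x ∈ s ∨ (PySem.Int.mod n i = 0 ∧ (x = i ∨ x = PySem.Int.floordiv n i) ∧ 2 < x ∧ x ≠ n) := by
  unfold pvAltStep
  split_ifs with h
  · simp only [List.foldl_cons, List.foldl_nil, pv_mem_condAdd]
    constructor
    · rintro ((hs | ⟨rfl, h2, h3⟩) | ⟨rfl, h2, h3⟩)
      · exact Or.inl hs
      · exact Or.inr ⟨h, Or.inl rfl, h2, h3⟩
      · exact Or.inr ⟨h, Or.inr rfl, h2, h3⟩
    · rintro (hs | ⟨_, (rfl | rfl), h2, h3⟩)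
      · exact Or.inl (Or.inl hs)
      · exact Or.inl (Or.inr ⟨rfl, h2, h3⟩)
      · exact Or.inr ⟨rfl, h2, h3⟩
  · simp [h]

theorem pv_nodup_condAdd (n d : Int) (s : PySem.Set Int) (h : s.Nodup) :
    (if d > 2 ∧ d ≠ n then PySem.Set.add s d else s).Nodup := by
  split_ifs
  · exact PySem.Set.nodup_add s d h
  · exact h

theorem pv_step_nodup (n : Int) (s : PySem.Set Int) (i : Int) (h : s.Nodup) :
    (pvAltStep n s i).Nodup := by
  unfold pvAltStep
  split_ifs
  · simp only [List.foldl_cons, List.foldl_nil]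
    exact pv_nodup_condAdd n _ _ (pv_nodup_condAdd n _ _ h)
  · exact h

theorem pv_loop_nodup (n : Int) : ∀ (i : Int) (s : PySem.Set Int),
    s.Nodup → (pvAltLoop n i s).Nodup :=
  pvAltLoop.induct n (fun i s => s.Nodup → (pvAltLoop n i s).Nodup)
    (fun i s hcond ih hs => by
      rw [pvAltLoop]; simp only [hcond, dite_true]
      exact ih (pv_step_nodup n s i hs))
    (fun i s hcond hs => by
      rw [pvAltLoop]; simp only [hcond, dite_false]; exact hs)

theorem pv_mem_loop (n : Int) : ∀ (i : Int) (s : PySem.Set Int), 2 ≤ i → ∀ (x : Int),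
    (x ∈ pvAltLoop n i s ↔
      x ∈ s ∨ ∃ j, i ≤ j ∧ j * j ≤ n ∧ PySem.Int.mod n j = 0 ∧
        (x = j ∨ x = PySem.Int.floordiv n j) ∧ 2 < x ∧ x ≠ n) :=
  pvAltLoop.induct n (fun i s => 2 ≤ i → ∀ x,
      (x ∈ pvAltLoop n i s ↔
        x ∈ s ∨ ∃ j, i ≤ j ∧ j * j ≤ n ∧ PySem.Int.mod n j = 0 ∧
          (x = j ∨ x = PySem.Int.floordiv n j) ∧ 2 < x ∧ x ≠ n))
    (fun i s hcond ih hi x => by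
      rw [pvAltLoop]; simp only [hcond, dite_true]
      rw [ih (by omega) x, pv_mem_step]
      constructor
      · rintro ((hs | ⟨hm, hx, h2, h3⟩) | ⟨j, hj1, hj2, hj3⟩)
        · exact Or.inl hs
        · exact Or.inr ⟨i, le_refl i, hcond, hm, hx, h2, h3⟩
        · exact Or.inr ⟨j, by omega, hj2, hj3⟩
      · rintro (hs | ⟨j, hj1, hj2, hj3, hj4, hj5⟩)
        · exact Or.inl (Or.inl hs)
        · by_cases hji : j = i
          · subst hji
            exact Or.inl (Or.inr ⟨hj3, hj4, hj5⟩)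
          · exact Or.inr ⟨j, by omega, hj2, hj3, hj4, hj5⟩)
    (fun i s hcond hi x => by
      rw [pvAltLoop]; simp only [hcond, dite_false]
      constructor
      · exact Or.inl
      · rintro (hs | ⟨j, hj1, hj2, _⟩)
        · exact hs
        · exfalso
          have : i * i ≤ j * j := mul_le_mul hj1 hj1 (by omega) (by omega)
          omega)

-- the number-theoretic core: a divisor in (2, n) ∪ {n} is reachable by trial division to sqrt n
theorem pv_divisor_iff (n x : Int) (hn : 2 < n) :
    (x = n ∨ ∃ j, 2 ≤ j ∧ j * j ≤ n ∧ PySem.Int.mod n j = 0 ∧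
        (x = j ∨ x = PySem.Int.floordiv n j) ∧ 2 < x ∧ x ≠ n)
      ↔ x ∈ pvListA n := by
  have hmem : x ∈ pvListA n ↔ x = n ∨ (x ∣ n ∧ 2 < x ∧ x ≠ n ∧ 1 ≤ x ∧ x ≤ n) := by
    simp only [pvListA, List.mem_cons, List.mem_map, List.mem_filter,
      PySem.List.mem_pyRange_one, decide_eq_true_eq, PySem.Int.mod_eq_zero_iff_dvd]
    constructor
    · rintro (rfl | ⟨i, ⟨⟨hi0, hin⟩, hdvd, h2, hne⟩, rfl⟩)
      · exact Or.inl rfl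
      · exact Or.inr ⟨hdvd, h2, hne, by omega, by omega⟩
    · rintro (rfl | ⟨hdvd, h2, hne, h1, hle⟩)
      · exact Or.inl rfl
      · exact Or.inr ⟨x - 1, ⟨⟨by omega, by omega⟩, by simpa using hdvd, by omega, by omega⟩, by omega⟩
  rw [hmem]
  constructor
  · rintro (rfl | ⟨j, hj2, hjj, hjm, hx, h2x, hxn⟩)
    · exact Or.inl rfl
    · right
      have hjpos : (0:Int) < j := by omega
      have hjdvd : j ∣ n := (PySem.Int.mod_eq_zero_iff_dvd n j).mp hjm
      rw [PySem.Int.floordiv_eq_ediv_of_pos hjpos] at hx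
      have hjn : j ≤ n := by nlinarith
      rcases hx with rfl | rfl
      · exact ⟨hjdvd, h2x, hxn, by omega, hjn⟩
      · refine ⟨⟨j, (Int.ediv_mul_cancel hjdvd).symm⟩, h2x, hxn, ?_,
          Int.ediv_le_self j (by omega)⟩
        rw [Int.le_ediv_iff_mul_le hjpos]; omega
  · rintro (rfl | ⟨hdvd, h2x, hxn, h1x, hxn'⟩)
    · exact Or.inl rfl
    · right
      have hxpos : (0:Int) < x := by omega
      set e := n / x with he
      have hne : n = x * e := (Int.mul_ediv_cancel' hdvd).symm
      have he1 : 1 ≤ e := by rw [he, Int.le_ediv_iff_mul_le hxpos]; omega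
      have he2 : 2 ≤ e := by
        by_cases h : e = 1
        · exfalso; rw [h, mul_one] at hne; exact hxn hne.symm
        · omega
      by_cases hxx : x * x ≤ n
      · exact ⟨x, by omega, hxx, (PySem.Int.mod_eq_zero_iff_dvd n x).mpr hdvd,
          Or.inl rfl, h2x, hxn⟩
      · have hee : e * e ≤ n := by nlinarith
        have hedvd : e ∣ n := Dvd.intro_left x hne.symm
        refine ⟨e, he2, hee, (PySem.Int.mod_eq_zero_iff_dvd n e).mpr hedvd, Or.inr ?_, h2x, hxn⟩
        rw [PySem.Int.floordiv_eq_ediv_of_pos (by omega : (0:Int) < e)]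
        have hde : n / e = x := by rw [hne]; exact Int.mul_ediv_cancel x (by omega)
        exact hde.symm

theorem pv_listA_nodup (n : Int) : (pvListA n).Nodup := by
  unfold pvListA
  rw [List.nodup_cons]
  constructor
  · simp only [List.mem_map, List.mem_filter, decide_eq_true_eq]
    rintro ⟨i, ⟨_, _, _, hne⟩, hi⟩
    exact hne hi
  · exact (((PySem.List.nodup_pyRange_one 0 n).filter _).map
      (fun a b h => by omega))

theorem pv_perm (n : Int) (hn : 2 < n) :
    (pvListA n).Perm (pvAltLoop n 2 (PySem.Set.add PySem.Set.empty n)) := by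
  have hs0 : (PySem.Set.add PySem.Set.empty n).Nodup :=
    PySem.Set.nodup_add PySem.Set.empty n List.nodup_nil
  rw [List.perm_ext_iff_of_nodup (pv_listA_nodup n) (pv_loop_nodup n 2 _ hs0)]
  intro x
  rw [pv_mem_loop n 2 _ (by norm_num) x, ← pv_divisor_iff n x hn]
  have : x ∈ PySem.Set.add PySem.Set.empty n ↔ x = n := by
    rw [PySem.Set.mem_add]
    simp [PySem.Set.empty]
  rw [this]

-- join with "" is flatten / fold-append, on the character level
theorem pv_join_nil_flatten (parts : List (List Char)) :
    PySem.Chars.join [] parts = parts.flatten := by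
  induction parts with
  | nil => simp [PySem.Chars.join_nil]
  | cons p rest ih =>
    cases rest with
    | nil => simp [PySem.Chars.join_singleton]
    | cons q r =>
      rw [PySem.Chars.join_cons_cons]
      simp [ih]

theorem pv_fold_aux (L : List String) : ∀ s : String,
    (L.foldl (fun parole i => parole ++ i) s).toList
      = s.toList ++ (L.map String.toList).flatten := by
  induction L with
  | nil => intro s; simp
  | cons x t ih =>
    intro s
    simp only [List.foldl_cons]
    rw [ih]
    simp [String.toList_append]

theorem pv_fold_append_eq_join (L : List String) :
    L.foldl (fun parole i => parole ++ i) "" = PySem.Str.join "" L := by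
  rw [← String.toList_inj, pv_fold_aux, PySem.Str.toList_join,
    (by decide : ("" : String).toList = []), pv_join_nil_flatten]
  simp

theorem pv_main (n : Int) : make_parole n = make_parole_alt n := by
  rw [pv_A_eq, pv_fold_append_eq_join]
  simp only [make_parole_alt, PySem.List.foldl_append_singleton_eq_map,
    PySem.List.foldl_append_eq_flatMap, List.nil_append]
  by_cases hn : n ≤ 2
  · simp only [hn, if_true]
    have hA : pvListA n = [n] := by
      unfold pvListA
      have : (PySem.List.pyRange 0 n 1).filter
          (fun i => decide (PySem.Int.mod n (i + 1) = 0 ∧ i + 1 > 2 ∧ i + 1 ≠ n)) = [] := by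
        rw [List.filter_eq_nil_iff]
        intro i hi
        have := PySem.List.mem_pyRange_one.mp hi
        simp only [decide_eq_true_eq]
        rintro ⟨_, h2, _⟩
        omega
      rw [this, List.map_nil]
    have hP : pvPairs n = [] := by
      unfold pvPairs
      rw [PySem.Int.floordiv_eq_ediv_of_pos (by norm_num : (0:Int) < 2),
        PySem.List.pyRange_one_eq_nil (a := 1) (b := (n + 1) / 2) (by omega), List.map_nil]
    rw [hA]
    simp only [List.flatMap_cons, List.flatMap_nil, hP, List.append_nil]
    rw [(PySem.List.sorted_eq_nil_iff ([] : List String) (fun x => x) false).mpr rfl]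
    decide
  · simp only [hn, if_false]
    have hn' : 2 < n := by omega
    congr 1
    rw [PySem.List.sorted_id_eq_sorted_id_iff_perm]
    have hfn : (fun d => (PySem.List.pyRange 1 (PySem.Int.floordiv (d + 1) 2) 1).map
        (fun a => PySem.Int.toStr a ++ PySem.Int.toStr (d - a))) = pvPairs := rfl
    rw [hfn]
    exact (pv_perm n hn').flatMap (fun a _ => List.Perm.refl _)

-- ===== VERDICT (by name: the statement is the Claim_ definition above) =====
theorem make_parole_spec : Claim_equal_make_parole := by
  intro n _
  unfold Spec_make_parole
  exact pv_main n
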